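-- pv_equiv track=rewrite | github.com/Lordimini/ldap-tools2 | flask_app/models/ldap.py | _escape_ldap_filter
-- ===== SOURCE A (Python) =====
-- def _escape_ldap_filter(input_string):
--     """
--     Échapper les caractères spéciaux dans un filtre LDAP.
--     """
--     if not input_string:
--         return ""
--
--     # Échapper les caractères spéciaux selon la RFC 2254
--     special_chars = {
--         '\\': r'\5c',
--         '*': r'\2a',
--         '(': r'\28',
--         ')': r'\29',
--         '\0': r'\00'
--     }
--
--     result = input_string
--     for char, replacement in special_chars.items():
--         result = result.replace(char, replacement)
--
--     return result
-- ===== SOURCE B (Python) =====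
-- def _escape_ldap_filter(input_string):
--     """
--     Échapper les caractères spéciaux dans un filtre LDAP.
--     """
--     if not input_string:
--         return ""
--
--     # Same RFC 2254 mapping, applied in ONE pass over the characters
--     special_chars = {
--         '\\': r'\5c',
--         '*': r'\2a',
--         '(': r'\28',
--         ')': r'\29',
--         '\0': r'\00'
--     }
--
--     out = []
--     for ch in input_string:
--         out.append(special_chars.get(ch, ch))
--     return "".join(out)
-- ===== Notes on version B (the rewrite author's own statement) =====
-- stated objective: alternative
-- what changed: Replaced five sequential whole-string str.replace passes with a single character-by-character pass that appends the table lookup special_chars.get(c, c) for each character and joins the pieces.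
import Mathlib
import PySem

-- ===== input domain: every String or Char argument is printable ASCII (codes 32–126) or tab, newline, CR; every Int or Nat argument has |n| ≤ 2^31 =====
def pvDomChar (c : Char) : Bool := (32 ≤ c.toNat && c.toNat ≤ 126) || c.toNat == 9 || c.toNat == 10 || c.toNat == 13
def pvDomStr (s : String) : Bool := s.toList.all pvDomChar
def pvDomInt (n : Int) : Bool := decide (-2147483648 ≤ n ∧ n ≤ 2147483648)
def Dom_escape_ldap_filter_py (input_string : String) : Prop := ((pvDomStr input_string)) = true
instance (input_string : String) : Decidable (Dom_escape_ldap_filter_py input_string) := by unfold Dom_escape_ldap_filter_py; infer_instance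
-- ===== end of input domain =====

-- B replaces A's five sequential whole-string .replace passes by a single character-by-character
-- pass with a table lookup (objective: alternative single-pass decomposition; same observable result).


-- ===== PORT A =====
-- the literal dict special_chars, as an association list in insertion order
def pvSpecials : List (String × String) :=
  [("\\", "\\5c"), ("*", "\\2a"), ("(", "\\28"), (")", "\\29"), ("\u0000", "\\00")]

def escape_ldap_filter_py (input_string : String) : String :=
  if input_string = "" then ""   -- `if not input_string` on a string = emptiness test
  else
    -- for char, replacement in special_chars.items(): result = result.replace(char, replacement)
    pvSpecials.foldl (fun result cr => PySem.Str.replace result cr.1 cr.2) input_string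

-- ===== PORT B =====
-- special_chars.get(ch, ch) as a character table (value given as its character list)
def pvEsc (c : Char) : List Char :=
  if c = '\\' then ['\\', '5', 'c']
  else if c = '*' then ['\\', '2', 'a']
  else if c = '(' then ['\\', '2', '8']
  else if c = ')' then ['\\', '2', '9']
  else if c = '\u0000' then ['\\', '0', '0']
  else [c]

def escape_ldap_filter_py_alt (input_string : String) : String :=
  if input_string = "" then ""
  else String.ofList (input_string.toList.flatMap pvEsc)   -- one pass: append the escape of each char, join

-- ===== PRECONDITION & SPEC =====
def Spec_escape_ldap_filter_py (input_string : String) (out : String) : Prop := out = escape_ldap_filter_py_alt input_string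
instance (input_string : String) (out : String) : Decidable (Spec_escape_ldap_filter_py input_string out) := by unfold Spec_escape_ldap_filter_py; infer_instance

-- ===== CLAIM (what is proved, stated in full; the proofs are below) =====
def Claim_equal_escape_ldap_filter_py : Prop := ∀ (input_string : String), Dom_escape_ldap_filter_py input_string → Spec_escape_ldap_filter_py input_string (escape_ldap_filter_py input_string)

-- ===== LEMMAS AND PROOFS =====

-- replace with a single-character pattern is a per-character flatMap
theorem replace_go_single (c : Char) (new : List Char) :
    ∀ (l : List Char) (fuel : Nat) (acc : List Char), l.length ≤ fuel →
      PySem.Chars.replace.go [c] new fuel l acc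
        = acc.reverse ++ l.flatMap (fun x => if x = c then new else [x]) := by
  intro l
  induction l with
  | nil =>
      intro fuel acc _
      cases fuel <;> simp [PySem.Chars.replace.go]
  | cons x t ih =>
      intro fuel acc h
      cases fuel with
      | zero => simp at h
      | succ f =>
        by_cases hx : x = c
        · subst hx
          simp only [PySem.Chars.replace.go, List.isPrefixOf, BEq.rfl, Bool.true_and,
            if_true, List.length_cons, List.length_nil, List.drop_succ_cons, List.drop_zero]
          rw [ih f (new.reverse ++ acc) (by simpa using Nat.le_of_succ_le_succ h)]
          simp
        · have hbe : (c == x) = false := by simp [Ne.symm hx]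
          simp only [PySem.Chars.replace.go, List.isPrefixOf, hbe, Bool.false_and, if_neg,
            Bool.false_eq_true, not_false_iff]
          rw [ih f (x :: acc) (by simpa using Nat.le_of_succ_le_succ h)]
          simp [hx]

theorem replace_single (c : Char) (new : List Char) (l : List Char) :
    PySem.Chars.replace l [c] new = l.flatMap (fun x => if x = c then new else [x]) := by
  rw [PySem.Chars.replace]
  simp only [List.isEmpty_cons, Bool.false_eq_true, if_neg, not_false_iff]
  simpa using replace_go_single c new l l.length [] (le_refl _)

-- the five chained per-character substitutions collapse to the single table pvEsc
theorem chain_eq_pvEsc (x : Char) :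
    ((if x = '\\' then ['\\','5','c'] else [x]).flatMap
      (fun y1 => (if y1 = '*' then ['\\','2','a'] else [y1]).flatMap
        (fun y2 => (if y2 = '(' then ['\\','2','8'] else [y2]).flatMap
          (fun y3 => (if y3 = ')' then ['\\','2','9'] else [y3]).flatMap
            (fun y4 => if y4 = '\u0000' then ['\\','0','0'] else [y4]))))) = pvEsc x := by
  by_cases h1 : x = '\\'
  · subst h1; decide
  by_cases h2 : x = '*'
  · subst h2; decide
  by_cases h3 : x = '('
  · subst h3; decide
  by_cases h4 : x = ')'
  · subst h4; decide
  by_cases h5 : x = '\u0000'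
  · subst h5; decide
  simp [pvEsc, h1, h2, h3, h4, h5]

-- ===== VERDICT (by name: the statement is the Claim_ definition above) =====
theorem escape_ldap_filter_py_spec : Claim_equal_escape_ldap_filter_py := by
  intro s _
  unfold Spec_escape_ldap_filter_py escape_ldap_filter_py escape_ldap_filter_py_alt
  by_cases hs : s = ""
  · simp [hs]
  · simp only [if_neg hs, pvSpecials, List.foldl_cons, List.foldl_nil]
    simp only [PySem.Str.replace, String.toList_ofList]
    have h1 : ("\\" : String).toList = ['\\'] := rfl
    have h2 : ("*" : String).toList = ['*'] := rfl
    have h3 : ("(" : String).toList = ['('] := rfl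
    have h4 : (")" : String).toList = [')'] := rfl
    have h5 : ("\u0000" : String).toList = ['\u0000'] := rfl
    have h1' : ("\\5c" : String).toList = ['\\','5','c'] := rfl
    have h2' : ("\\2a" : String).toList = ['\\','2','a'] := rfl
    have h3' : ("\\28" : String).toList = ['\\','2','8'] := rfl
    have h4' : ("\\29" : String).toList = ['\\','2','9'] := rfl
    have h5' : ("\\00" : String).toList = ['\\','0','0'] := rfl
    rw [h1, h2, h3, h4, h5, h1', h2', h3', h4', h5']
    rw [replace_single, replace_single, replace_single, replace_single, replace_single]
    rw [List.flatMap_assoc, List.flatMap_assoc, List.flatMap_assoc, List.flatMap_assoc]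
    congr 1
    exact List.flatMap_congr (fun x _ => chain_eq_pvEsc x)
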